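-- pv_equiv track=rewrite | github.com/GunvantGMC/Competitive-Programing | RepetativeNum.py | nonRepetitive
-- ===== SOURCE A (Python) =====
-- def nonRepetitive(N, arr, k):
--     n = N
--     roll_numbers = {}
--     for i in range(n):
--         rn = arr[i]
--         if rn in roll_numbers:
--             roll_numbers[rn] += 1
--         else:
--             roll_numbers[rn] = 1
--     k = k
--     count = 0
--     for rn, c in roll_numbers.items():
--         if c == 1:
--             count += 1
--             if count == k:
--                 return(rn)
-- ===== SOURCE B (Python) =====
-- def nonRepetitive(N, arr, k):
--     counts = {}
--     for i in range(N):
--         counts[arr[i]] = counts.get(arr[i], 0) + 1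
--     uniques = [arr[i] for i in range(N) if counts[arr[i]] == 1]
--     if 1 <= k <= len(uniques):
--         return uniques[k - 1]
--     return None
-- ===== Notes on version B (the rewrite author's own statement) =====
-- stated objective: simpler
-- what changed: Replaces the dict-items scan with a running counter and early return by a second pass over the array itself that collects the unique elements in order, then a direct bounds-checked index uniques[k-1].
import Mathlib
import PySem

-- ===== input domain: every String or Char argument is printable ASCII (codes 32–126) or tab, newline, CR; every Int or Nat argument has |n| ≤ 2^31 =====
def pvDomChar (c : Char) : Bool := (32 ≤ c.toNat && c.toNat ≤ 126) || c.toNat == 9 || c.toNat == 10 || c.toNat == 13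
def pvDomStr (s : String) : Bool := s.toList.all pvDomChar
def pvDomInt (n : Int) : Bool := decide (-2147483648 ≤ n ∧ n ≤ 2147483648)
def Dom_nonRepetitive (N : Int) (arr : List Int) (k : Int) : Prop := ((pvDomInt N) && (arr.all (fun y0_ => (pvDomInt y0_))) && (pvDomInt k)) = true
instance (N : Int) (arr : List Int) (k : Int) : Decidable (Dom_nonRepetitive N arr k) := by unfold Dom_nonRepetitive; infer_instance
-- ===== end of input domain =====

-- B replaces A's dict-items scan with a running counter by a second pass over the array
-- collecting the unique elements, then a bounds-checked direct index (objective: simpler).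

-- ===== PORT A =====
-- first loop of A: build the frequency dict over arr[0..N-1] (option-threaded: none = IndexError)
def pvBuildA (N : Int) (arr : List Int) : Option (PySem.Dict Int Int) :=
  (PySem.List.pyRange 0 N 1).foldl
    (fun od i => od.bind (fun d => (PySem.List.pyGet? arr i).map (fun rn =>
      if d.contains rn then d.insert rn (d.getD rn 0 + 1) else d.insert rn 1)))
    (some PySem.Dict.empty)

-- second loop of A: scan the items with a running counter, early return at count == k
def pvScanA : List (Int × Int) → Int → Int → Option Int
  | [], _, _ => none
  | (rn, c) :: rest, k, count =>
      if c == 1 then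
        (if count + 1 == k then some rn else pvScanA rest k (count + 1))
      else pvScanA rest k count

def nonRepetitive (N : Int) (arr : List Int) (k : Int) : Option Int :=
  match pvBuildA N arr with
  | none => none
  | some d => pvScanA d.items k 0

-- ===== PORT B =====
-- counts[arr[i]] = counts.get(arr[i], 0) + 1
def pvBuildB (N : Int) (arr : List Int) : Option (PySem.Dict Int Int) :=
  (PySem.List.pyRange 0 N 1).foldl
    (fun od i => od.bind (fun d => (PySem.List.pyGet? arr i).map (fun x =>
      d.insert x (d.getD x 0 + 1))))
    (some PySem.Dict.empty)

-- uniques = [arr[i] for i in range(N) if counts[arr[i]] == 1]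
-- (counts[x] ported as getD x 0: exact here, every arr[i] with i < N is a key of counts)
def pvUniqB (counts : PySem.Dict Int Int) (N : Int) (arr : List Int) : Option (List Int) :=
  (PySem.List.pyRange 0 N 1).foldl
    (fun ol i => ol.bind (fun l => (PySem.List.pyGet? arr i).map (fun x =>
      if counts.getD x 0 == 1 then l ++ [x] else l)))
    (some [])

def nonRepetitive_alt (N : Int) (arr : List Int) (k : Int) : Option Int :=
  match pvBuildB N arr with
  | none => none
  | some counts =>
    match pvUniqB counts N arr with
    | none => none
    | some uniques =>
        if 1 ≤ k ∧ k ≤ (uniques.length : Int) then PySem.List.pyGet? uniques (k - 1) else none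

-- ===== PRECONDITION & SPEC =====
-- A raises IndexError iff N > len(arr) (negative N gives an empty range); only that is excluded.
def Pre_nonRepetitive (N : Int) (arr : List Int) (k : Int) : Prop := N ≤ (arr.length : Int)
instance (N : Int) (arr : List Int) (k : Int) : Decidable (Pre_nonRepetitive N arr k) := by unfold Pre_nonRepetitive; infer_instance
def pvWitness_nonRepetitive : Int × List Int × Int := (3, [1, 2, 1], 1)

def Spec_nonRepetitive (N : Int) (arr : List Int) (k : Int) (out : Option Int) : Prop := out = nonRepetitive_alt N arr k
instance (N : Int) (arr : List Int) (k : Int) (out : Option Int) : Decidable (Spec_nonRepetitive N arr k out) := by unfold Spec_nonRepetitive; infer_instance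

-- ===== CLAIM (what is proved, stated in full; the proofs are below) =====
def Claim_equal_nonRepetitive : Prop := ∀ (N : Int) (arr : List Int) (k : Int), Dom_nonRepetitive N arr k → Pre_nonRepetitive N arr k → Spec_nonRepetitive N arr k (nonRepetitive N arr k)

-- ===== LEMMAS AND PROOFS =====

-- an option-threaded fold over range(n) indexing arr is a plain fold over the prefix
theorem pvFoldOpt {σ : Type} (arr : List Int) (g : σ → Int → σ) :
    ∀ (n : Nat) (s0 : σ), n ≤ arr.length →
      (PySem.List.pyRange 0 (n : Int) 1).foldl
        (fun os i => os.bind (fun s => (PySem.List.pyGet? arr i).map (fun x => g s x))) (some s0)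
      = some ((arr.take n).foldl g s0) := by
  intro n
  induction n with
  | zero => intro s0 _; simp [PySem.List.pyRange_one_eq_nil]
  | succ n ih =>
      intro s0 h
      have hn : n < arr.length := by omega
      have hcast : ((n + 1 : Nat) : Int) = (n : Int) + 1 := by push_cast; ring
      rw [hcast, PySem.List.pyRange_one_succ_right (by positivity), List.foldl_append,
        ih s0 (by omega)]
      have htake : arr.take (n + 1) = arr.take n ++ [arr[n]] := by
        rw [List.take_add_one]; simp [List.getElem?_eq_getElem hn]
      rw [htake, List.foldl_append]
      simp [PySem.List.pyGet?_natCast, List.getElem?_eq_getElem hn]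

-- A's insert-or-init loop body is the counter body
theorem pvBuildA_eq_counter (arr : List Int) (n : Nat) (h : n ≤ arr.length) :
    pvBuildA (n : Int) arr = some (PySem.Dict.counter (arr.take n)) := by
  unfold pvBuildA
  have h2 := pvFoldOpt (σ := PySem.Dict Int Int) arr
      (fun d rn => if d.contains rn then d.insert rn (d.getD rn 0 + 1) else d.insert rn 1) n
      PySem.Dict.empty h
  refine h2.trans ?_
  congr 1
  have hfun : (fun (d : PySem.Dict Int Int) (rn : Int) =>
      if d.contains rn then d.insert rn (d.getD rn 0 + 1) else d.insert rn 1)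
      = fun d rn => d.insert rn (d.getD rn 0 + 1) := by
    funext d rn
    by_cases hc : d.contains rn
    · simp [hc]
    · have hc' : d.contains rn = false := by simpa using hc
      simp [hc', PySem.Dict.getD_of_not_contains]
  rw [hfun, PySem.Dict.foldl_insert_getD_add_one_eq_counter]

theorem pvBuildB_eq_counter (arr : List Int) (n : Nat) (h : n ≤ arr.length) :
    pvBuildB (n : Int) arr = some (PySem.Dict.counter (arr.take n)) := by
  unfold pvBuildB
  have h2 := pvFoldOpt (σ := PySem.Dict Int Int) arr (fun d x => d.insert x (d.getD x 0 + 1)) n PySem.Dict.empty h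
  refine h2.trans ?_
  rw [PySem.Dict.foldl_insert_getD_add_one_eq_counter]

theorem pvUniqB_eq_filter (counts : PySem.Dict Int Int) (arr : List Int) (n : Nat)
    (h : n ≤ arr.length) :
    pvUniqB counts (n : Int) arr
      = some ((arr.take n).filter (fun x => counts.getD x 0 == 1)) := by
  unfold pvUniqB
  have h2 := pvFoldOpt (σ := List Int) arr (fun l x => if counts.getD x 0 == 1 then l ++ [x] else l) n [] h
  refine h2.trans ?_
  rw [PySem.List.foldl_append_if_eq_filter]
  simp

-- dedup (set-of-list) and the list itself agree on elements occurring at most once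
theorem pvSetFilter (q : Int → Bool) :
    ∀ (t s : List Int), (∀ x, q x = true → x ∈ s → x ∉ t) →
      (∀ x, q x = true → t.count x ≤ 1) →
      (t.foldl PySem.Set.add s).filter q = s.filter q ++ t.filter q := by
  intro t
  induction t with
  | nil => intro s _ _; simp
  | cons a t' ih =>
      intro s hst hcnt
      simp only [List.foldl_cons]
      by_cases hq : q a = true
      · have has : a ∉ s := fun hmem => hst a hq hmem (List.mem_cons_self)
        have hadd : PySem.Set.add s a = s ++ [a] := by
          simp [PySem.Set.add, PySem.Set.contains, has]
        have hat' : a ∉ t' := by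
          have := hcnt a hq
          simp [List.count_cons_self] at this
          exact List.count_eq_zero.mp (by omega)
        rw [hadd, ih (s ++ [a])
          (by
            intro x hx hmem
            rcases List.mem_append.mp hmem with hxs | hxa
            · exact fun hxt => hst x hx hxs (List.mem_cons_of_mem _ hxt)
            · simp at hxa; subst hxa; exact hat')
          (fun x hx => le_trans (List.count_le_count_cons) (hcnt x hx))]
        simp [List.filter_append, hq]
      · have hq' : q a = false := by simpa using hq
        have hfilt : (PySem.Set.add s a).filter q = s.filter q := by
          simp only [PySem.Set.add]
          split
          · rfl
          · simp [List.filter_append, hq']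
        have hmem' : ∀ x, q x = true → x ∈ PySem.Set.add s a → x ∉ t' := by
          intro x hx hmem
          have : x ∈ s ∨ x = a := by
            simp only [PySem.Set.add] at hmem
            split at hmem
            · exact Or.inl hmem
            · rcases List.mem_append.mp hmem with h1 | h2
              · exact Or.inl h1
              · simp at h2; exact Or.inr h2
          rcases this with hxs | rfl
          · exact fun hxt => hst x hx hxs (List.mem_cons_of_mem _ hxt)
          · rw [hx] at hq'; cases hq'
        rw [ih (PySem.Set.add s a) hmem'
          (fun x hx => le_trans (List.count_le_count_cons) (hcnt x hx))]
        rw [hfilt, List.filter_cons_of_neg (by simp [hq'])]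

-- A's early-return scan is an index into the count-1 keys
theorem pvScanA_eq (k : Int) :
    ∀ (L : List (Int × Int)) (c : Int),
      pvScanA L k c
        = if c < k then ((L.filter (fun p => p.2 == 1)).map Prod.fst)[(k - c - 1).toNat]? else none := by
  intro L
  induction L with
  | nil => intro c; simp [pvScanA]
  | cons p rest ih =>
      intro c
      obtain ⟨rn, cnt⟩ := p
      by_cases h1 : cnt = 1
      · subst h1
        rw [show pvScanA ((rn, 1) :: rest) k c
            = if c + 1 = k then some rn else pvScanA rest k (c + 1) from by simp [pvScanA]]
        rw [List.filter_cons_of_pos (by simp), List.map_cons]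
        by_cases hk : c + 1 = k
        · rw [if_pos hk, if_pos (show c < k by omega),
            show (k - c - 1).toNat = 0 from by omega]
          simp
        · rw [if_neg hk, ih (c + 1)]
          by_cases hlt : c + 1 < k
          · rw [if_pos hlt, if_pos (by omega),
              show (k - c - 1).toNat = (k - (c + 1) - 1).toNat + 1 from by omega]
            simp
          · rw [if_neg hlt, if_neg (by omega)]
      · rw [show pvScanA ((rn, cnt) :: rest) k c = pvScanA rest k c from by
          simp [pvScanA, h1]]
        rw [List.filter_cons_of_neg (by simp [h1])]
        exact ih c

-- ===== VERDICT (by name: the statement is the Claim_ definition above) =====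
theorem nonRepetitive_spec : Claim_equal_nonRepetitive := by
  intro N arr k _ hpre
  unfold Spec_nonRepetitive nonRepetitive nonRepetitive_alt
  have hrange : PySem.List.pyRange 0 N 1 = PySem.List.pyRange 0 (N.toNat : Int) 1 := by
    by_cases h0 : 0 ≤ N
    · rw [Int.toNat_of_nonneg h0]
    · rw [PySem.List.pyRange_one_eq_nil (by omega), PySem.List.pyRange_one_eq_nil (by omega)]
  have hNA : pvBuildA N arr = pvBuildA (N.toNat : Int) arr := by unfold pvBuildA; rw [hrange]
  have hNB : pvBuildB N arr = pvBuildB (N.toNat : Int) arr := by unfold pvBuildB; rw [hrange]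
  have hlen : N.toNat ≤ arr.length := by unfold Pre_nonRepetitive at hpre; omega
  set xs := arr.take N.toNat with hxs
  set q : Int → Bool := fun x => (xs.count x : Int) == 1 with hq
  have hqfilt : xs.filter (fun x => (PySem.Dict.counter xs).getD x 0 == 1) = xs.filter q := by
    apply List.filter_congr; intro x _; simp [hq, PySem.Dict.getD_counter]
  have hitems : ((PySem.Dict.counter xs).items.filter (fun p => p.2 == 1)).map Prod.fst
      = xs.filter q := by
    rw [PySem.Dict.items_counter, List.filter_map, List.map_map]
    have hc : (PySem.Set.ofList xs).filter ((fun p => p.2 == 1) ∘ fun v => (v, (xs.count v : Int)))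
        = (PySem.Set.ofList xs).filter q := by
      apply List.filter_congr; intro x _; simp [hq]
    rw [hc]
    have hsf : (xs.foldl PySem.Set.add []).filter q = List.filter q [] ++ xs.filter q :=
      pvSetFilter q xs []
        (by intro x _ hmem; simp at hmem)
        (by intro x hx; simp [hq] at hx; omega)
    rw [PySem.Set.ofList_eq_foldl, hsf]
    simp [Function.comp_def]
  rw [hNA, hNB, pvBuildA_eq_counter arr N.toNat hlen, pvBuildB_eq_counter arr N.toNat hlen]
  dsimp only
  have hNU : pvUniqB (PySem.Dict.counter xs) N arr
      = pvUniqB (PySem.Dict.counter xs) (N.toNat : Int) arr := by unfold pvUniqB; rw [hrange]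
  rw [hNU, pvUniqB_eq_filter (PySem.Dict.counter xs) arr N.toNat hlen]
  dsimp only
  rw [hqfilt, pvScanA_eq k ((PySem.Dict.counter xs).items) 0, hitems]
  set F := xs.filter q with hF
  by_cases hk0 : 0 < k
  · rw [if_pos hk0]
    by_cases hkl : k ≤ (F.length : Int)
    · rw [if_pos ⟨by omega, hkl⟩,
        show PySem.List.pyGet? F (k - 1) = F[(k - 1).toNat]? from
          PySem.List.pyGet?_of_nonneg F (by omega)]
      congr 1; omega
    · rw [if_neg (by intro hc; exact hkl hc.2)]
      rw [List.getElem?_eq_none (by omega)]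
  · rw [if_neg hk0, if_neg (by intro hc; omega)]
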